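-- pv_equiv track=rewrite | github.com/Zhang3zhe/Python100Cases | 100examples/011.py | rabbitNumber
-- ===== SOURCE A (Python) =====
-- def rabbitNumber(month):
--     list = [1,0,0,0]
--     for i in range(month):
--         x = list[0]
--         y = list[1]
--         z = list[2]
--         w = list[3]
--         list[0] = z + w
--         list[1] = x
--         list[2] = y
--         list[3] = z + w
--     return list[0] + list[1] + list[2] + list[3]
-- ===== SOURCE B (Python) =====
-- def rabbitNumber(month):
--     # f(n) = f(n-1) + f(n-3) with f(0)=f(1)=f(2)=1; computed by
--     # binary exponentiation of the 3x3 transition matrix.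
--     if month < 3:
--         return 1
--
--     def mul(A, B):
--         return tuple(
--             tuple(sum(A[i][k] * B[k][j] for k in range(3)) for j in range(3))
--             for i in range(3)
--         )
--
--     M = ((1, 0, 1), (1, 0, 0), (0, 1, 0))
--     R = ((1, 0, 0), (0, 1, 0), (0, 0, 1))
--     e = month - 2
--     while e > 0:
--         if e & 1:
--             R = mul(R, M)
--         M = mul(M, M)
--         e >>= 1
--     return R[0][0] + R[0][1] + R[0][2]
-- ===== Notes on version B (the rewrite author's own statement) =====
-- stated objective: faster
-- what changed: Replaced the month-step 4-slot simulation loop by binary exponentiation of the 3x3 transition matrix of the recurrence f(n)=f(n-1)+f(n-3).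
import Mathlib
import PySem

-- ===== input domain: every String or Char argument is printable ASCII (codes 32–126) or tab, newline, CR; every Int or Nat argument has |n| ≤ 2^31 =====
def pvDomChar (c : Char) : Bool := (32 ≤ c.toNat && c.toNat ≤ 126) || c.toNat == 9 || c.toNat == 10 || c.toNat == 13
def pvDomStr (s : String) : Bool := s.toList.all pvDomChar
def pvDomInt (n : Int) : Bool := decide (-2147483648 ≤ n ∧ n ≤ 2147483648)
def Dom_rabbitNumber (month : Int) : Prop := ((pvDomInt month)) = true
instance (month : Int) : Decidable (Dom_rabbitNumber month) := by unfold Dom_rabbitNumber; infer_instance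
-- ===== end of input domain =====

-- B replaces A's month-step state loop by O(log month) binary exponentiation
-- of the 3x3 transition matrix of f(n) = f(n-1) + f(n-3).

-- ===== PORT A =====
-- A's loop body on the four list slots [x, y, z, w]
def stepA (s : Int × Int × Int × Int) : Int × Int × Int × Int :=
  let x := s.1
  let y := s.2.1
  let z := s.2.2.1
  let w := s.2.2.2
  (z + w, x, y, z + w)

def rabbitNumber (month : Int) : Int :=
  let l := (PySem.List.pyRange 0 month 1).foldl (fun s _ => stepA s) (1, 0, 0, 0)
  l.1 + l.2.1 + l.2.2.1 + l.2.2.2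

-- ===== PORT B =====
structure M3 where
  a11 : Int
  a12 : Int
  a13 : Int
  a21 : Int
  a22 : Int
  a23 : Int
  a31 : Int
  a32 : Int
  a33 : Int
deriving DecidableEq, Repr

def m3mul (A B : M3) : M3 :=
  ⟨A.a11 * B.a11 + A.a12 * B.a21 + A.a13 * B.a31,
   A.a11 * B.a12 + A.a12 * B.a22 + A.a13 * B.a32,
   A.a11 * B.a13 + A.a12 * B.a23 + A.a13 * B.a33,
   A.a21 * B.a11 + A.a22 * B.a21 + A.a23 * B.a31,
   A.a21 * B.a12 + A.a22 * B.a22 + A.a23 * B.a32,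
   A.a21 * B.a13 + A.a22 * B.a23 + A.a23 * B.a33,
   A.a31 * B.a11 + A.a32 * B.a21 + A.a33 * B.a31,
   A.a31 * B.a12 + A.a32 * B.a22 + A.a33 * B.a32,
   A.a31 * B.a13 + A.a32 * B.a23 + A.a33 * B.a33⟩

def m3one : M3 := ⟨1, 0, 0, 0, 1, 0, 0, 0, 1⟩

def matM : M3 := ⟨1, 0, 1, 1, 0, 0, 0, 1, 0⟩

-- Source B's while loop: accumulator R, square M, halve e
def powLoop (R M : M3) (e : Nat) : M3 :=
  if e = 0 then R
  else powLoop (if e % 2 = 1 then m3mul R M else R) (m3mul M M) (e / 2)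

def rabbitNumber_alt (month : Int) : Int :=
  if month < 3 then 1
  else
    let R := powLoop m3one matM (month - 2).toNat
    R.a11 + R.a12 + R.a13

-- ===== PRECONDITION & SPEC =====
def Spec_rabbitNumber (month : Int) (out : Int) : Prop := out = rabbitNumber_alt month
instance (month : Int) (out : Int) : Decidable (Spec_rabbitNumber month out) := by unfold Spec_rabbitNumber; infer_instance

-- ===== CLAIM (what is proved, stated in full; the proofs are below) =====
def Claim_equal_rabbitNumber : Prop := ∀ (month : Int), Dom_rabbitNumber month → Spec_rabbitNumber month (rabbitNumber month)

-- ===== LEMMAS AND PROOFS =====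

-- the sequence both programs compute
def f : Nat → Int
  | 0 => 1
  | 1 => 1
  | 2 => 1
  | n + 3 => f (n + 2) + f n

-- naive matrix power (proof-side reference)
def npow (M : M3) : Nat → M3
  | 0 => m3one
  | n + 1 => m3mul M (npow M n)

lemma m3mul_assoc (A B C : M3) : m3mul (m3mul A B) C = m3mul A (m3mul B C) := by
  simp only [m3mul, M3.mk.injEq]; and_intros <;> ring

lemma m3mul_one (A : M3) : m3mul A m3one = A := by
  cases A; simp only [m3mul, m3one, M3.mk.injEq]; and_intros <;> ring

lemma m3one_mul (A : M3) : m3mul m3one A = A := by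
  cases A; simp only [m3mul, m3one, M3.mk.injEq]; and_intros <;> ring

lemma npow_two_mul (M : M3) (k : Nat) : npow (m3mul M M) k = npow M (2 * k) := by
  induction k with
  | zero => rfl
  | succ k ih =>
    have h : 2 * (k + 1) = (2 * k + 1) + 1 := by ring
    rw [npow, ih, h, npow, npow, ← m3mul_assoc]

lemma powLoop_eq (e : Nat) : ∀ R M : M3, powLoop R M e = m3mul R (npow M e) := by
  induction e using Nat.strong_induction_on with
  | _ e ih =>
    intro R M
    rw [powLoop]
    by_cases h0 : e = 0
    · simp [h0, npow, m3mul_one]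
    · rw [if_neg h0, ih (e / 2) (Nat.div_lt_self (Nat.pos_of_ne_zero h0) one_lt_two),
        npow_two_mul]
      by_cases h1 : e % 2 = 1
      · rw [if_pos h1, m3mul_assoc, ← npow, show (2 * (e / 2)).succ = e by omega]
      · have he : 2 * (e / 2) = e := by omega
        rw [if_neg h1, he]

-- applying a matrix to a column vector
def app (M : M3) (v : Int × Int × Int) : Int × Int × Int :=
  (M.a11 * v.1 + M.a12 * v.2.1 + M.a13 * v.2.2,
   M.a21 * v.1 + M.a22 * v.2.1 + M.a23 * v.2.2,
   M.a31 * v.1 + M.a32 * v.2.1 + M.a33 * v.2.2)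

lemma app_mul (A B : M3) (v : Int × Int × Int) :
    app (m3mul A B) v = app A (app B v) := by
  simp only [app, m3mul, Prod.mk.injEq]; and_intros <;> ring

lemma app_npow (n : Nat) : app (npow matM n) (1, 1, 1) = (f (n + 2), f (n + 1), f n) := by
  induction n with
  | zero => decide
  | succ n ih =>
    rw [npow, app_mul, ih]
    show (_, _, _) = (f (n + 3), f (n + 2), f (n + 1))
    simp only [matM, f, Prod.mk.injEq]
    and_intros <;> ring

lemma alt_eq_f (month : Int) : rabbitNumber_alt month = f month.toNat := by
  unfold rabbitNumber_alt
  by_cases h : month < 3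
  · rw [if_pos h]
    have : month.toNat = 0 ∨ month.toNat = 1 ∨ month.toNat = 2 := by omega
    rcases this with h' | h' | h' <;> rw [h'] <;> rfl
  · rw [if_neg h]
    simp only [powLoop_eq, m3one_mul]
    have hv := app_npow (month - 2).toNat
    have h2 : (month - 2).toNat + 2 = month.toNat := by omega
    rw [h2] at hv
    have h3 := congrArg Prod.fst hv
    simp only [app, mul_one] at h3
    exact h3

-- A-side: the loop is an iterate of stepA
lemma foldl_const_iterate (l : List Int) (init : Int × Int × Int × Int) :
    l.foldl (fun s _ => stepA s) init = stepA^[l.length] init := by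
  induction l generalizing init with
  | nil => rfl
  | cons a l ih => simp [List.foldl, ih, Function.iterate_succ_apply]

-- the linear map ψ turning A's 4-state into the (f(n+2), f(n+1), f(n)) triple
def psi (s : Int × Int × Int × Int) : Int × Int × Int :=
  (s.1 + 2 * s.2.1 + 3 * s.2.2.1 + 3 * s.2.2.2,
   s.1 + s.2.1 + 2 * s.2.2.1 + 2 * s.2.2.2,
   s.1 + s.2.1 + s.2.2.1 + s.2.2.2)

lemma psi_iterate (n : Nat) :
    psi (stepA^[n] (1, 0, 0, 0)) = (f (n + 2), f (n + 1), f n) := by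
  induction n with
  | zero => decide
  | succ n ih =>
    rw [Function.iterate_succ_apply']
    rcases hs : stepA^[n] (1, 0, 0, 0) with ⟨a, b, c, d⟩
    rw [hs] at ih
    show psi (stepA (a, b, c, d)) = (f (n + 3), f (n + 2), f (n + 1))
    simp only [psi, stepA, Prod.mk.injEq] at ih ⊢
    obtain ⟨h1, h2, h3⟩ := ih
    have hf : f (n + 3) = f (n + 2) + f n := rfl
    refine ⟨by omega, by omega, by omega⟩

lemma a_eq_f (month : Int) : rabbitNumber month = f month.toNat := by
  unfold rabbitNumber
  rw [foldl_const_iterate, PySem.List.length_pyRange_one]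
  have h0 : (month - 0).toNat = month.toNat := by omega
  rw [h0]
  have := psi_iterate month.toNat
  have h3 := congrArg (fun t : Int × Int × Int => t.2.2) this
  simpa [psi] using h3

-- ===== VERDICT (by name: the statement is the Claim_ definition above) =====
theorem rabbitNumber_spec : Claim_equal_rabbitNumber := by
  intro month _
  unfold Spec_rabbitNumber
  rw [a_eq_f, alt_eq_f]
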